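-- pv_equiv track=rewrite | github.com/gaplin/Advent_of_Code_2018 | 2/day2p2.py | common_full_box_text
-- ===== SOURCE A (Python) =====
-- def common_full_box_text(box_A: str, box_B: str):
--     common_text = ''
--     misses = 0
--     for a, b in zip(box_A, box_B):
--         if a == b:
--             common_text += a
--         else:
--             misses += 1
--             if misses > 1:
--                 return None
--     return common_text
-- ===== SOURCE B (Python) =====
-- def common_full_box_text(box_A: str, box_B: str):
--     n = min(len(box_A), len(box_B))
--     a, b = box_A[:n], box_B[:n]
--     i = 0
--     while i < n and a[i] == b[i]:
--         i += 1
--     if i == n: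
--         return a
--     if a[i + 1:] != b[i + 1:]:
--         return None
--     return a[:i] + a[i + 1:]
-- ===== Notes on version B (the rewrite author's own statement) =====
-- stated objective: alternative
-- what changed: B scans only up to the first mismatching position, then decides the whole question with one bulk equality test of the remaining suffixes and rebuilds the answer by slicing around that position, instead of A's walk over every position with a mismatch counter and character-by-character accumulation.
import Mathlib
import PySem

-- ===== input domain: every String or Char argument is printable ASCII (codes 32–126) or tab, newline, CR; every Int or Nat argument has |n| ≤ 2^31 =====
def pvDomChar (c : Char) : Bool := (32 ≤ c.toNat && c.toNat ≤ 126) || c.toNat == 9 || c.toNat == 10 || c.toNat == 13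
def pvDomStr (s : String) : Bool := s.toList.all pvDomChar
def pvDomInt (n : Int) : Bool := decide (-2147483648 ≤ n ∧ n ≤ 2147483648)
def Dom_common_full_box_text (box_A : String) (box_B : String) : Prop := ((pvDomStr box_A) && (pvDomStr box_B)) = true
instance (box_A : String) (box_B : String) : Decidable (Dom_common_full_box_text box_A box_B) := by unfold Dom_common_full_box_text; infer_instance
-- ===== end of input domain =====

set_option maxHeartbeats 400000


-- B scans to the first mismatch only, then decides with one bulk suffix-equality test and slicing; objective: alternative decomposition, same cost.

-- ===== PORT A =====
-- A's for-loop over zip with accumulator `common_text` and counter `misses`, early return on misses > 1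
def pvLoopA : List (Char × Char) → String → Nat → Option String
  | [], common_text, _ => some common_text
  | (a, b) :: rest, common_text, misses =>
    if a == b then pvLoopA rest (common_text.push a) misses
    else if misses + 1 > 1 then none
    else pvLoopA rest common_text (misses + 1)

def common_full_box_text (box_A : String) (box_B : String) : Option String :=
  pvLoopA (box_A.toList.zip box_B.toList) "" 0

-- ===== PORT B =====
-- the `while i < n and a[i] == b[i]` loop of Source B (a, b both have length n, so the
-- recursion stopping at the shorter list is exactly the `i < n` bound)
def pvPrefLen : List Char → List Char → Nat
  | a :: as, b :: bs => if a == b then pvPrefLen as bs + 1 else 0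
  | _, _ => 0

-- slices with nonnegative bounds: s[:n] = take n, s[k:] = drop k (exact for k, n ≥ 0)
def common_full_box_text_alt (box_A : String) (box_B : String) : Option String :=
  let n := min box_A.length box_B.length
  let a := box_A.toList.take n
  let b := box_B.toList.take n
  let i := pvPrefLen a b
  if i = n then some (String.ofList a)
  else if a.drop (i + 1) ≠ b.drop (i + 1) then none
  else some (String.ofList (a.take i ++ a.drop (i + 1)))

-- ===== PRECONDITION & SPEC =====
def Spec_common_full_box_text (box_A : String) (box_B : String) (out : Option String) : Prop := out = common_full_box_text_alt box_A box_B
instance (box_A : String) (box_B : String) (out : Option String) : Decidable (Spec_common_full_box_text box_A box_B out) := by unfold Spec_common_full_box_text; infer_instance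

-- ===== CLAIM (what is proved, stated in full; the proofs are below) =====
def Claim_equal_common_full_box_text : Prop := ∀ (box_A : String) (box_B : String), Dom_common_full_box_text box_A box_B → Spec_common_full_box_text box_A box_B (common_full_box_text box_A box_B)

-- ===== LEMMAS AND PROOFS =====

-- invariant of A's loop: with misses ≤ 1 it returns none iff the mismatch count exceeds 1,
-- else the accumulator followed by the matching characters
lemma loopA_eq (ps : List (Char × Char)) (acc : String) (m : Nat) (hm : m ≤ 1) :
    pvLoopA ps acc m =
      if m + (ps.filter (fun p => p.1 != p.2)).length > 1 then none
      else some (String.ofList (acc.toList ++ (ps.filter (fun p => p.1 == p.2)).map Prod.fst)) := by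
  induction ps generalizing acc m with
  | nil =>
    rw [show pvLoopA [] acc m = some acc from rfl]
    simp only [List.filter_nil, List.length_nil]
    rw [if_neg (by omega)]
    simp
  | cons p rest ih =>
    obtain ⟨a, b⟩ := p
    by_cases h : a = b
    · subst h
      have step : pvLoopA ((a, a) :: rest) acc m = pvLoopA rest (acc.push a) m := by
        simp [pvLoopA]
      rw [step, ih (acc.push a) m hm]
      simp
    · have hne : (a != b) = true := by simp [h]
      have heq : (a == b) = false := by simp [h]
      by_cases hm0 : m = 0
      · subst hm0
        have step : pvLoopA ((a, b) :: rest) acc 0 = pvLoopA rest acc 1 := by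
          simp [pvLoopA, heq]
        rw [step, ih acc 1 (by omega)]
        rw [show List.filter (fun p => p.1 != p.2) ((a, b) :: rest) = (a, b) :: List.filter (fun p => p.1 != p.2) rest from by simp [hne]]
        rw [show List.filter (fun p => p.1 == p.2) ((a, b) :: rest) = List.filter (fun p => p.1 == p.2) rest from by simp [heq]]
        simp only [List.length_cons]
        split_ifs <;> first | rfl | omega
      · have hm1 : m = 1 := by omega
        subst hm1
        have step : pvLoopA ((a, b) :: rest) acc 1 = none := by
          simp [pvLoopA, heq]
        rw [step]
        rw [show List.filter (fun p => p.1 != p.2) ((a, b) :: rest) = (a, b) :: List.filter (fun p => p.1 != p.2) rest from by simp [hne]]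
        simp only [List.length_cons]
        split_ifs <;> first | rfl | omega

-- on equal-length lists, no zip pair differs iff the lists are equal
lemma filter_ne_nil_iff (xs ys : List Char) (h : xs.length = ys.length) :
    ((xs.zip ys).filter (fun p => p.1 != p.2)).length = 0 ↔ xs = ys := by
  induction xs generalizing ys with
  | nil => cases ys <;> simp_all
  | cons x xs ih =>
    cases ys with
    | nil => simp_all
    | cons y ys =>
      simp only [List.length_cons, Nat.succ.injEq] at h
      by_cases hxy : x = y
      · subst hxy
        simp only [List.zip_cons_cons, List.filter_cons, bne_self_eq_false,
          Bool.false_eq_true, if_false, List.cons.injEq, true_and]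
        exact ih ys h
      · simp [List.zip_cons_cons, hxy]

lemma filter_eq_map_self (xs : List Char) :
    ((xs.zip xs).filter (fun p => p.1 == p.2)).map Prod.fst = xs := by
  induction xs with
  | nil => rfl
  | cons x xs ih => simp [List.zip_cons_cons, ih]

-- the mismatch-count closed form of A's loop equals B's prefix/suffix computation (lists of equal length)
lemma count_form_eq_alt (xs ys : List Char) (h : xs.length = ys.length) :
    (if ((xs.zip ys).filter (fun p => p.1 != p.2)).length > 1 then none
     else some (((xs.zip ys).filter (fun p => p.1 == p.2)).map Prod.fst)) =
    (if pvPrefLen xs ys = xs.length then some xs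
     else if xs.drop (pvPrefLen xs ys + 1) ≠ ys.drop (pvPrefLen xs ys + 1) then none
     else some (xs.take (pvPrefLen xs ys) ++ xs.drop (pvPrefLen xs ys + 1))) := by
  induction xs generalizing ys with
  | nil => cases ys <;> simp_all [pvPrefLen]
  | cons x xs ih =>
    cases ys with
    | nil => simp_all
    | cons y ys =>
      simp only [List.length_cons, Nat.succ.injEq] at h
      have hih := ih ys h
      by_cases hxy : x = y
      · subst hxy
        have hp : pvPrefLen (x :: xs) (x :: ys) = pvPrefLen xs ys + 1 := by
          simp [pvPrefLen]
        have e1 : List.filter (fun p => p.1 != p.2) ((x, x) :: xs.zip ys)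
            = List.filter (fun p => p.1 != p.2) (xs.zip ys) := by simp
        have e2 : List.filter (fun p => p.1 == p.2) ((x, x) :: xs.zip ys)
            = (x, x) :: List.filter (fun p => p.1 == p.2) (xs.zip ys) := by simp
        simp only [List.zip_cons_cons, e1, e2, hp, List.map_cons, List.length_cons,
          List.drop_succ_cons, List.take_succ_cons, List.cons_append]
        simp only [Nat.add_right_cancel_iff]
        split_ifs at hih ⊢ <;> simp_all
      · have hp : pvPrefLen (x :: xs) (y :: ys) = 0 := by
          simp [pvPrefLen, hxy]
        have e1 : List.filter (fun p => p.1 != p.2) ((x, y) :: xs.zip ys)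
            = (x, y) :: List.filter (fun p => p.1 != p.2) (xs.zip ys) := by simp [hxy]
        have e2 : List.filter (fun p => p.1 == p.2) ((x, y) :: xs.zip ys)
            = List.filter (fun p => p.1 == p.2) (xs.zip ys) := by simp [hxy]
        simp only [List.zip_cons_cons, e1, e2, hp, List.length_cons, Nat.zero_add,
          List.drop_succ_cons, List.drop_zero, List.take_zero, List.nil_append]
        rw [if_neg (show ¬((0 : Nat) = xs.length + 1) by omega)]
        have hiff := filter_ne_nil_iff xs ys h
        by_cases hxys : xs = ys
        · subst hxys
          rw [hiff.mpr rfl]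
          rw [if_neg (show ¬((0 : Nat) + 1 > 1) by omega), if_neg (show ¬(xs ≠ xs) by simp)]
          simp [filter_eq_map_self]
        · have h0 : ((xs.zip ys).filter (fun p => p.1 != p.2)).length ≠ 0 :=
            fun hc => hxys (hiff.mp hc)
          rw [if_pos (show ((xs.zip ys).filter (fun p => p.1 != p.2)).length + 1 > 1 by omega), if_pos hxys]

-- zipping ignores everything past the shorter list
lemma zip_take_min (xs ys : List Char) :
    xs.zip ys = (xs.take (min xs.length ys.length)).zip (ys.take (min xs.length ys.length)) := by
  induction xs generalizing ys with
  | nil => simp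
  | cons x xs ih =>
    cases ys with
    | nil => simp
    | cons y ys =>
      simp only [List.length_cons, Nat.succ_min_succ, List.take_succ_cons, List.zip_cons_cons]
      rw [← ih ys]

-- ===== VERDICT (by name: the statement is the Claim_ definition above) =====
theorem common_full_box_text_spec : Claim_equal_common_full_box_text := by
  intro box_A box_B _
  unfold Spec_common_full_box_text common_full_box_text common_full_box_text_alt
  set n := min box_A.length box_B.length with hn
  have hlA : box_A.length = box_A.toList.length := by simp
  have hlB : box_B.length = box_B.toList.length := by simp
  have hta : (box_A.toList.take n).length = n := by
    rw [List.length_take]; omega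
  have htb : (box_B.toList.take n).length = n := by
    rw [List.length_take]; omega
  have hz : box_A.toList.zip box_B.toList = (box_A.toList.take n).zip (box_B.toList.take n) := by
    have := zip_take_min box_A.toList box_B.toList
    rwa [show min box_A.toList.length box_B.toList.length = n by omega] at this
  rw [loopA_eq _ _ _ (by omega), hz]
  have key := count_form_eq_alt (box_A.toList.take n) (box_B.toList.take n) (by omega)
  rw [hta] at key
  simp only [String.toList_empty, List.nil_append, Nat.zero_add]
  have lhs_eq :
      (if ((((box_A.toList.take n).zip (box_B.toList.take n)).filter (fun p => p.1 != p.2)).length > 1 : Prop) then (none : Option String)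
       else some (String.ofList ((((box_A.toList.take n).zip (box_B.toList.take n)).filter (fun p => p.1 == p.2)).map Prod.fst)))
      = Option.map String.ofList
        (if (((box_A.toList.take n).zip (box_B.toList.take n)).filter (fun p => p.1 != p.2)).length > 1 then none
         else some ((((box_A.toList.take n).zip (box_B.toList.take n)).filter (fun p => p.1 == p.2)).map Prod.fst)) := by
    split_ifs <;> rfl
  rw [lhs_eq, key]
  split_ifs <;> rfl
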